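-- pv_equiv track=rewrite | github.com/sandeepkumar09/InterviewBit | TwoPointer.py/minimizeTheAbsoluteDifference.py | solve
-- ===== SOURCE A (Python) =====
-- def solve(A, B, C):
-- 	i = len(A) - 1
-- 	j = len(B) - 1
-- 	k = len(C) - 1
-- 	min_diff = abs(max(A[i], B[j], C[k]) - min(A[i], B[j], C[k]))
-- 	while i != -1 and j != -1 and k != -1:
-- 		current_diff = abs(max(A[i], B[j], C[k]) - min(A[i], B[j], C[k]))
-- 		min_diff = min(min_diff, current_diff)
-- 		max_term = max(A[i], B[j], C[k])
-- 		if A[i] == max_term: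
-- 			i -= 1
-- 		elif B[j] == max_term:
-- 			j -= 1
-- 		else:
-- 			k -= 1
-- 	return min_diff
-- ===== SOURCE B (Python) =====
-- def solve(A, B, C):
-- 	xs, ys, zs = list(A), list(B), list(C)
-- 	diffs = []
-- 	while xs and ys and zs:
-- 		hi = max(xs[-1], ys[-1], zs[-1])
-- 		lo = min(xs[-1], ys[-1], zs[-1])
-- 		diffs.append(hi - lo)
-- 		if xs[-1] == hi:
-- 			xs.pop()
-- 		elif ys[-1] == hi:
-- 			ys.pop()
-- 		else:
-- 			zs.pop()
-- 	return min(diffs)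
-- ===== Notes on version B (the rewrite author's own statement) =====
-- stated objective: alternative
-- what changed: Replaces A's three integer index pointers with a running minimum (and a redundant pre-loop diff computation) by a two-phase version: pop elements off the list ends collecting every diff along the greedy walk, then take one min() over the collected list.
import Mathlib
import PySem

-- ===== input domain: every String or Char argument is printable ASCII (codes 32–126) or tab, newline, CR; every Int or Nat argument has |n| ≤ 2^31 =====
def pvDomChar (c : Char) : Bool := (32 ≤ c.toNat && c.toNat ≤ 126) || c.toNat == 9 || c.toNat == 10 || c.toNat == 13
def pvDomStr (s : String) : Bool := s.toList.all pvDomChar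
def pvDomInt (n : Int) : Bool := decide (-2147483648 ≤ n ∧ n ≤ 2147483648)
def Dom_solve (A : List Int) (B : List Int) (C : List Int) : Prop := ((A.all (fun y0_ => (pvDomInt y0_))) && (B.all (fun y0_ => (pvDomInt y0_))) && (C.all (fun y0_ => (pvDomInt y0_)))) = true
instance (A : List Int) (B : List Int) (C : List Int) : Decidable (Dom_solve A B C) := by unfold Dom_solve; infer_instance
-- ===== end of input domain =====

-- B replaces A's index-decrementing while loop with its running minimum (and redundant pre-loop diff)
-- by a two-phase version: pop elements off the list ends collecting every path diff, then one min() at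
-- the end; same greedy walk, different decomposition ("alternative").

-- ===== PORT A =====
-- the while loop of A; fuel bounds the number of iterations (each iteration decrements one pointer,
-- so |A|+|B|+|C|+1 steps always suffice); pyGetD's default 0 is never read for in-range indices
def solveLoop (A B C : List Int) : Nat → Int → Int → Int → Int → Int
  | 0, _, _, _, min_diff => min_diff
  | fuel + 1, i, j, k, min_diff =>
    if i ≠ -1 ∧ j ≠ -1 ∧ k ≠ -1 then
      let a := PySem.List.pyGetD A i 0
      let b := PySem.List.pyGetD B j 0
      let c := PySem.List.pyGetD C k 0
      let current_diff := |max a (max b c) - min a (min b c)|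
      let min_diff' := min min_diff current_diff
      let max_term := max a (max b c)
      if a = max_term then solveLoop A B C fuel (i - 1) j k min_diff'
      else if b = max_term then solveLoop A B C fuel i (j - 1) k min_diff'
      else solveLoop A B C fuel i j (k - 1) min_diff'
    else min_diff

def solve (A : List Int) (B : List Int) (C : List Int) : Int :=
  let i : Int := (A.length : Int) - 1
  let j : Int := (B.length : Int) - 1
  let k : Int := (C.length : Int) - 1
  let a := PySem.List.pyGetD A i 0
  let b := PySem.List.pyGetD B j 0
  let c := PySem.List.pyGetD C k 0
  let min_diff := |max a (max b c) - min a (min b c)|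
  solveLoop A B C (A.length + B.length + C.length + 1) i j k min_diff

-- ===== PORT B =====
-- Source B's while loop: pops the end of the list holding the current maximum, collecting the diffs
def goB (xs ys zs : List Int) : List Int :=
  if _h : xs ≠ [] ∧ ys ≠ [] ∧ zs ≠ [] then
    let a := PySem.List.pyGetD xs (-1) 0
    let b := PySem.List.pyGetD ys (-1) 0
    let c := PySem.List.pyGetD zs (-1) 0
    let hi := max a (max b c)
    let lo := min a (min b c)
    if a = hi then (hi - lo) :: goB xs.dropLast ys zs
    else if b = hi then (hi - lo) :: goB xs ys.dropLast zs
    else (hi - lo) :: goB xs ys zs.dropLast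
  else []
  termination_by xs.length + ys.length + zs.length
  decreasing_by
    all_goals (simp [List.length_dropLast, ← List.length_eq_zero_iff] at _h ⊢; omega)

-- min(diffs): Python raises ValueError on an empty diffs list, which happens only outside Pre_solve;
-- the .getD default is unreachable there
def solve_alt (A : List Int) (B : List Int) (C : List Int) : Int :=
  (PySem.List.min? (goB A B C) (fun d => d)).getD 0

-- ===== PRECONDITION & SPEC =====
-- Pre_ excludes exactly the inputs where some list is empty: there A raises IndexError on A[-1]/B[-1]/C[-1]
def Pre_solve (A : List Int) (B : List Int) (C : List Int) : Prop := A ≠ [] ∧ B ≠ [] ∧ C ≠ []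
instance (A : List Int) (B : List Int) (C : List Int) : Decidable (Pre_solve A B C) := by unfold Pre_solve; infer_instance
def pvWitness_solve : List Int × List Int × List Int := ([1, 5], [3], [2, 4])

def Spec_solve (A : List Int) (B : List Int) (C : List Int) (out : Int) : Prop := out = solve_alt A B C
instance (A : List Int) (B : List Int) (C : List Int) (out : Int) : Decidable (Spec_solve A B C out) := by unfold Spec_solve; infer_instance

-- ===== CLAIM (what is proved, stated in full; the proofs are below) =====
def Claim_equal_solve : Prop := ∀ (A : List Int) (B : List Int) (C : List Int), Dom_solve A B C → Pre_solve A B C → Spec_solve A B C (solve A B C)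

-- ===== LEMMAS AND PROOFS =====

theorem pyGetD_nat (l : List Int) (i : Nat) (h : i < l.length) :
    PySem.List.pyGetD l (i : Int) 0 = l[i] := by
  simp [PySem.List.pyGetD_natCast, h]

theorem abs_max_sub_min (a b c : Int) :
    |max a (max b c) - min a (min b c)| = max a (max b c) - min a (min b c) :=
  abs_of_nonneg (sub_nonneg.mpr (le_trans (min_le_left _ _) (le_max_left _ _)))

theorem solveLoop_stop (A B C : List Int) (f : Nat) (i j k md : Int)
    (h : i = -1 ∨ j = -1 ∨ k = -1) : solveLoop A B C f i j k md = md := by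
  cases f with
  | zero => rfl
  | succ n => rw [solveLoop, if_neg (by tauto)]

theorem pyGetD_last (l : List Int) (i : Nat) (h : i < l.length) :
    PySem.List.pyGetD (l.take (i + 1)) (-1) 0 = l[i] := by
  simp [PySem.List.pyGetD, PySem.List.pyGet?, PySem.List.pyIdx?]
  rw [if_pos (by omega)]
  have hm : min (i + 1) l.length - 1 = i := by omega
  simp [List.getElem?_take, h]

theorem take_ne_nil (l : List Int) (i : Nat) (h : i < l.length) : l.take (i + 1) ≠ [] := by
  simp [← List.length_eq_zero_iff]
  omega

theorem dropLast_take_succ (l : List Int) (i : Nat) (h : i < l.length) :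
    (l.take (i + 1)).dropLast = l.take i := by
  rw [List.dropLast_eq_take, List.take_take]
  congr 1
  simp
  omega

theorem goB_nil (ys zs : List Int) : goB [] ys zs = [] := by
  rw [goB, dif_neg (by simp)]

theorem minD_eq : ∀ (t : List Int) (d : Int),
    PySem.List.min? (d :: t) (fun x => x) = some (t.foldl min d) := by
  intro t
  induction t with
  | nil => intro d; rfl
  | cons x t ih =>
    intro d
    have h1 : PySem.List.min? (d :: x :: t) (fun y => y)
        = PySem.List.min? (min d x :: t) (fun y => y) := by
      simp only [PySem.List.min?, List.foldl_cons]
      congr 1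
      by_cases hx : x < d
      · rw [if_pos hx]; congr 1; omega
      · rw [if_neg hx]; congr 1; omega
    rw [h1, ih (min d x), List.foldl_cons]

theorem loop_eq (A B C : List Int) (fuel : Nat) :
    ∀ (i j k : Nat) (md : Int), i < A.length → j < B.length → k < C.length →
      i + j + k < fuel →
      solveLoop A B C fuel (i : Int) (j : Int) (k : Int) md
        = (goB (A.take (i+1)) (B.take (j+1)) (C.take (k+1))).foldl min md := by
  induction fuel with
  | zero => intro i j k md _ _ _ hf; omega
  | succ f ih =>
    intro i j k md hi hj hk hf
    rw [solveLoop, if_pos (by omega : (i:Int) ≠ -1 ∧ (j:Int) ≠ -1 ∧ (k:Int) ≠ -1)]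
    simp only [pyGetD_nat A i hi, pyGetD_nat B j hj, pyGetD_nat C k hk]
    rw [goB, dif_pos ⟨take_ne_nil A i hi, take_ne_nil B j hj, take_ne_nil C k hk⟩]
    simp only [pyGetD_last A i hi, pyGetD_last B j hj, pyGetD_last C k hk, abs_max_sub_min,
      dropLast_take_succ A i hi, dropLast_take_succ B j hj, dropLast_take_succ C k hk]
    by_cases h1 : A[i] = max A[i] (max B[j] C[k])
    · rw [if_pos h1, if_pos h1, List.foldl_cons]
      rcases Nat.eq_zero_or_pos i with h0 | h0
      · subst h0
        rw [solveLoop_stop _ _ _ _ _ _ _ _ (by norm_num), List.take_zero, goB_nil, List.foldl_nil]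
      · have hc1 : ((i:Int) - 1) = ((i - 1 : Nat) : Int) := by omega
        have hi' : i - 1 < A.length := by omega
        have hb : i - 1 + j + k < f := by omega
        rw [hc1, ih (i-1) j k _ hi' hj hk hb]
        have ht : i - 1 + 1 = i := by omega
        rw [ht]
    · rw [if_neg h1, if_neg h1]
      by_cases h2 : B[j] = max A[i] (max B[j] C[k])
      · rw [if_pos h2, if_pos h2, List.foldl_cons]
        rcases Nat.eq_zero_or_pos j with h0 | h0
        · subst h0
          rw [solveLoop_stop _ _ _ _ _ _ _ _ (by norm_num), List.take_zero]
          rw [goB, dif_neg (by simp), List.foldl_nil]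
        · have hc1 : ((j:Int) - 1) = ((j - 1 : Nat) : Int) := by omega
          have hj' : j - 1 < B.length := by omega
          have hb : i + (j - 1) + k < f := by omega
          rw [hc1, ih i (j-1) k _ hi hj' hk hb]
          have ht : j - 1 + 1 = j := by omega
          rw [ht]
      · rw [if_neg h2, if_neg h2, List.foldl_cons]
        rcases Nat.eq_zero_or_pos k with h0 | h0
        · subst h0
          rw [solveLoop_stop _ _ _ _ _ _ _ _ (by norm_num), List.take_zero]
          rw [goB, dif_neg (by simp), List.foldl_nil]
        · have hc1 : ((k:Int) - 1) = ((k - 1 : Nat) : Int) := by omega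
          have hk' : k - 1 < C.length := by omega
          have hb : i + j + (k - 1) < f := by omega
          rw [hc1, ih i j (k-1) _ hi hj hk' hb]
          have ht : k - 1 + 1 = k := by omega
          rw [ht]

-- ===== VERDICT (by name: the statement is the Claim_ definition above) =====
theorem solve_spec : Claim_equal_solve := by
  intro A B C _ hpre
  obtain ⟨hA, hB, hC⟩ := hpre
  have hAl : 0 < A.length := List.length_pos_iff.mpr hA
  have hBl : 0 < B.length := List.length_pos_iff.mpr hB
  have hCl : 0 < C.length := List.length_pos_iff.mpr hC
  have hi : A.length - 1 < A.length := by omega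
  have hj : B.length - 1 < B.length := by omega
  have hk : C.length - 1 < C.length := by omega
  show solve A B C = solve_alt A B C
  rw [solve]
  have cA : ((A.length : Int) - 1) = ((A.length - 1 : Nat) : Int) := by omega
  have cB : ((B.length : Int) - 1) = ((B.length - 1 : Nat) : Int) := by omega
  have cC : ((C.length : Int) - 1) = ((C.length - 1 : Nat) : Int) := by omega
  simp only [cA, cB, cC, pyGetD_nat A _ hi, pyGetD_nat B _ hj, pyGetD_nat C _ hk,
    abs_max_sub_min]
  rw [loop_eq A B C _ _ _ _ _ hi hj hk (by omega)]
  have tA : A.take (A.length - 1 + 1) = A := List.take_of_length_le (by omega)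
  have tB : B.take (B.length - 1 + 1) = B := List.take_of_length_le (by omega)
  have tC : C.take (C.length - 1 + 1) = C := List.take_of_length_le (by omega)
  rw [tA, tB, tC]
  -- the first diff collected by B equals A's pre-loop diff; peel one step of goB
  have hgA : PySem.List.pyGetD A (-1) 0 = A[A.length - 1] := by
    conv_lhs => rw [← tA]
    exact pyGetD_last A _ hi
  have hgB : PySem.List.pyGetD B (-1) 0 = B[B.length - 1] := by
    conv_lhs => rw [← tB]
    exact pyGetD_last B _ hj
  have hgC : PySem.List.pyGetD C (-1) 0 = C[C.length - 1] := by
    conv_lhs => rw [← tC]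
    exact pyGetD_last C _ hk
  set d0 : Int := max A[A.length - 1] (max B[B.length - 1] C[C.length - 1])
    - min A[A.length - 1] (min B[B.length - 1] C[C.length - 1]) with hd0
  obtain ⟨t, hsplit⟩ : ∃ t, goB A B C = d0 :: t := by
    rw [goB, dif_pos ⟨hA, hB, hC⟩]
    simp only [hgA, hgB, hgC]
    split_ifs <;> exact ⟨_, rfl⟩
  rw [hsplit, solve_alt, hsplit, List.foldl_cons, min_self, minD_eq t d0, Option.getD_some]
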